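-- pv_equiv track=rewrite | github.com/Azimlearning/VERA-AI | python/rag_image_retriever.py | _infer_layout_from_content
-- ===== SOURCE A (Python) =====
-- def _infer_layout_from_content(content: str) -> str:
--     """Infer layout type from content text"""
--     content_lower = content.lower()
--     if any(word in content_lower for word in ['dashboard', 'chart', 'graph', 'data']):
--         return 'dashboard'
--     elif any(word in content_lower for word in ['timeline', 'process', 'flow', 'step']):
--         return 'horizontal_flow'
--     elif any(word in content_lower for word in ['circular', 'radial', 'pie']):
--         return 'circular'
--     elif any(word in content_lower for word in ['grid', 'multiple', 'sections']):
--         return 'grid'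
--     elif any(word in content_lower for word in ['minimal', 'clean', 'simple']):
--         return 'minimal'
--     else:
--         return 'vertical'
-- ===== SOURCE B (Python) =====
-- _KEYWORD_PRIORITY = {
--     'dashboard': 0, 'chart': 0, 'graph': 0, 'data': 0,
--     'timeline': 1, 'process': 1, 'flow': 1, 'step': 1,
--     'circular': 2, 'radial': 2, 'pie': 2,
--     'grid': 3, 'multiple': 3, 'sections': 3,
--     'minimal': 4, 'clean': 4, 'simple': 4,
-- }
-- _LABELS = ['dashboard', 'horizontal_flow', 'circular', 'grid', 'minimal', 'vertical']
--
-- def _infer_layout_from_content(content: str) -> str: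
--     """Pick the label of the best (lowest) priority among all matched keywords."""
--     cl = content.lower()
--     best = len(_LABELS) - 1
--     for word, priority in _KEYWORD_PRIORITY.items():
--         if priority < best and word in cl:
--             best = priority
--     return _LABELS[best]
-- ===== Notes on version B (the rewrite author's own statement) =====
-- stated objective: alternative
-- what changed: Instead of an ordered if/elif chain of grouped short-circuit membership tests, B checks every keyword once against a flat keyword->priority map, keeps the minimum matched priority in an accumulator, and indexes a label table with it; correct because keyword priorities mirror A's rule order, so the minimum matched priority is exactly the first matching rule.
import Mathlib
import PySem

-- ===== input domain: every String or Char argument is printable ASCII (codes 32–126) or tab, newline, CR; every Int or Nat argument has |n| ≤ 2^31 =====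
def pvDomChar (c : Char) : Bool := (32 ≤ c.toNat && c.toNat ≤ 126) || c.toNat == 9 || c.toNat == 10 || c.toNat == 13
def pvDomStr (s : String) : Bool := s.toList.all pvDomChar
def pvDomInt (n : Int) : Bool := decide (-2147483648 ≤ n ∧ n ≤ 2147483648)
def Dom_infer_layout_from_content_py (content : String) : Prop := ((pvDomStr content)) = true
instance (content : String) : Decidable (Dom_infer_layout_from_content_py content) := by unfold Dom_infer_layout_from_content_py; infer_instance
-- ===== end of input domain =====

-- B replaces A's ordered if/elif chain of grouped membership tests by a single
-- accumulator pass over a flat keyword->priority map, keeping the minimum matched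
-- priority and indexing a label table with it (alternative algorithm, same cost).

-- ===== PORT A =====
def infer_layout_from_content_py (content : String) : String :=
  let content_lower := PySem.Str.lower content
  if ["dashboard", "chart", "graph", "data"].any (fun w => PySem.Str.isIn w content_lower) then
    "dashboard"
  else if ["timeline", "process", "flow", "step"].any (fun w => PySem.Str.isIn w content_lower) then
    "horizontal_flow"
  else if ["circular", "radial", "pie"].any (fun w => PySem.Str.isIn w content_lower) then
    "circular"
  else if ["grid", "multiple", "sections"].any (fun w => PySem.Str.isIn w content_lower) then
    "grid"
  else if ["minimal", "clean", "simple"].any (fun w => PySem.Str.isIn w content_lower) then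
    "minimal"
  else
    "vertical"

-- ===== PORT B =====
-- _KEYWORD_PRIORITY (a dict with distinct literal keys; iterated in insertion order)
def pvKwPrio : List (String × Nat) :=
  [("dashboard", 0), ("chart", 0), ("graph", 0), ("data", 0),
   ("timeline", 1), ("process", 1), ("flow", 1), ("step", 1),
   ("circular", 2), ("radial", 2), ("pie", 2),
   ("grid", 3), ("multiple", 3), ("sections", 3),
   ("minimal", 4), ("clean", 4), ("simple", 4)]

def pvLabels : List String := ["dashboard", "horizontal_flow", "circular", "grid", "minimal", "vertical"]

def infer_layout_from_content_py_alt (content : String) : String :=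
  let cl := PySem.Str.lower content
  let best := pvKwPrio.foldl
    (fun best wp => if decide (wp.2 < best) && PySem.Str.isIn wp.1 cl then wp.2 else best)
    (pvLabels.length - 1)
  -- _LABELS[best]: best ≤ 5 < len(_LABELS) always, so the lookup never misses
  (PySem.List.pyGet? pvLabels (best : Int)).getD "vertical"

-- ===== PRECONDITION & SPEC =====
def Spec_infer_layout_from_content_py (content : String) (out : String) : Prop := out = infer_layout_from_content_py_alt content
instance (content : String) (out : String) : Decidable (Spec_infer_layout_from_content_py content out) := by unfold Spec_infer_layout_from_content_py; infer_instance

-- ===== CLAIM (what is proved, stated in full; the proofs are below) =====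
def Claim_equal_infer_layout_from_content_py : Prop := ∀ (content : String), Dom_infer_layout_from_content_py content → Spec_infer_layout_from_content_py content (infer_layout_from_content_py content)

-- ===== LEMMAS AND PROOFS =====

-- B's guarded update is an unconditional min on matched keywords
def pvG (cl : String) (b : Nat) (wp : String × Nat) : Nat :=
  if PySem.Str.isIn wp.1 cl then min b wp.2 else b

theorem pvFold_guard (cl : String) (l : List (String × Nat)) (b : Nat) :
    l.foldl (fun best wp => if decide (wp.2 < best) && PySem.Str.isIn wp.1 cl then wp.2 else best) b
      = l.foldl (pvG cl) b := by
  induction l generalizing b with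
  | nil => rfl
  | cons wp l ih =>
    simp only [List.foldl_cons]
    rw [ih]
    congr 1
    unfold pvG
    rcases Bool.dichotomy (PySem.Str.isIn wp.1 cl) with h | h
    · rw [if_neg (by rw [h, Bool.and_false]; exact Bool.false_ne_true),
        if_neg (by rw [h]; exact Bool.false_ne_true)]
    · rw [if_pos h]
      rcases Nat.lt_or_ge wp.2 b with hb | hb
      · rw [if_pos (by rw [h, Bool.and_true, decide_eq_true_eq]; omega), Nat.min_eq_right hb.le]
      · rw [if_neg (by rw [h, Bool.and_true, decide_eq_true_eq]; omega), Nat.min_eq_left hb]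

-- folding a constant-priority segment = one grouped any-test
theorem pvFold_const (cl : String) (p : Nat) (ws : List String) (b : Nat) :
    (ws.map (fun w => (w, p))).foldl (pvG cl) b
      = if ws.any (fun w => PySem.Str.isIn w cl) then min b p else b := by
  induction ws generalizing b with
  | nil => simp
  | cons w ws ih =>
    simp only [List.map_cons, List.foldl_cons, List.any_cons, pvG]
    rcases Bool.dichotomy (PySem.Str.isIn w cl) with h | h
    · rw [if_neg (by rw [h]; exact Bool.false_ne_true)]
      simp only [h, Bool.false_or]
      exact ih b
    · rw [if_pos h, ih,
        if_pos (show (PySem.Str.isIn w cl || ws.any fun w => PySem.Str.isIn w cl) = true by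
          rw [h, Bool.true_or])]
      split_ifs
      · rw [Nat.min_assoc, Nat.min_self]
      · rfl

theorem pvKwPrio_split :
    pvKwPrio =
      (["dashboard", "chart", "graph", "data"].map (fun w => (w, 0)))
      ++ (["timeline", "process", "flow", "step"].map (fun w => (w, 1)))
      ++ (["circular", "radial", "pie"].map (fun w => (w, 2)))
      ++ (["grid", "multiple", "sections"].map (fun w => (w, 3)))
      ++ (["minimal", "clean", "simple"].map (fun w => (w, 4))) := rfl

-- ===== VERDICT (by name: the statement is the Claim_ definition above) =====
theorem infer_layout_from_content_py_spec : Claim_equal_infer_layout_from_content_py := by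
  intro content _
  unfold Spec_infer_layout_from_content_py infer_layout_from_content_py infer_layout_from_content_py_alt
  dsimp only
  rw [pvFold_guard, pvKwPrio_split]
  simp only [List.foldl_append, pvFold_const]
  set cl := PySem.Str.lower content with hcl
  cases h1 : ["dashboard", "chart", "graph", "data"].any (fun w => PySem.Str.isIn w cl) <;>
  cases h2 : ["timeline", "process", "flow", "step"].any (fun w => PySem.Str.isIn w cl) <;>
  cases h3 : ["circular", "radial", "pie"].any (fun w => PySem.Str.isIn w cl) <;>
  cases h4 : ["grid", "multiple", "sections"].any (fun w => PySem.Str.isIn w cl) <;>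
  cases h5 : ["minimal", "clean", "simple"].any (fun w => PySem.Str.isIn w cl) <;>
    simp [h1, h2, h3, h4, h5, pvLabels, PySem.List.pyGet?, PySem.List.pyIdx?]
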